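-- pv_equiv track=rewrite | github.com/cryogenic22/CTX.ai | ctxpack/core/packer/toml_parser.py | _strip_inline_comment_toml
-- ===== SOURCE A (Python) =====
-- def _strip_inline_comment_toml(text: str) -> str:
--     """Strip inline comments respecting quotes."""
--     in_quote = None
--     for i, ch in enumerate(text):
--         if ch in ('"', "'") and in_quote is None:
--             in_quote = ch
--         elif ch == in_quote:
--             in_quote = None
--         elif ch == "#" and in_quote is None:
--             return text[:i].rstrip()
--     return text
-- ===== SOURCE B (Python) =====
-- def _strip_inline_comment_toml(text: str) -> str:
--     """Strip inline comments respecting quotes (find-and-jump scan)."""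
--     i = 0
--     n = len(text)
--     while i < n:
--         c = text[i]
--         if c == '"' or c == "'":
--             j = text.find(c, i + 1)
--             if j == -1:
--                 return text  # unterminated quote swallows the rest of the line
--             i = j + 1
--         elif c == '#':
--             return text[:i].rstrip()
--         else:
--             i += 1
--     return text
-- ===== Notes on version B (the rewrite author's own statement) =====
-- stated objective: alternative
-- what changed: Replaces A's per-character quote-state machine (in_quote flag toggled char by char) with a find-and-jump scan: on an opening quote it jumps directly past the matching close via str.find, returning text unchanged if the quote is unterminated, and cuts at the first unquoted '#'.
import Mathlib
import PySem

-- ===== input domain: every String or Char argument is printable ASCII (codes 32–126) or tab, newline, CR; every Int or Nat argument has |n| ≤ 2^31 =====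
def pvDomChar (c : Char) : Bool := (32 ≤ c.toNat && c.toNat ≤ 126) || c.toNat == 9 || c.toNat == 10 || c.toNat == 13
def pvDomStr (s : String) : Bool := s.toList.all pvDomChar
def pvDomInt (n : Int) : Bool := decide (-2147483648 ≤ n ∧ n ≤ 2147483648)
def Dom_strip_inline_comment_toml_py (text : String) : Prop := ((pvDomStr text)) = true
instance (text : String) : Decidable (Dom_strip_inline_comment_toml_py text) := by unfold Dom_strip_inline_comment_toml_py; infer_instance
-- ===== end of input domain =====

-- B replaces A's per-character quote-state machine with a find-and-jump scan that
-- skips each quoted region in one step (objective: alternative; same cost, no state variable).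

-- ===== PORT A =====
-- A's for-loop over enumerate(text) with quote state; acc holds the scanned prefix
-- reversed, so text[:i] = acc.reverse and the final 'return text' = acc.reverse.
def pvGoA (acc rest : List Char) (q : Option Char) : List Char :=
  match rest with
  | [] => acc.reverse
  | c :: cs =>
    if (c = '"' ∨ c = '\'') ∧ q = none then pvGoA (c :: acc) cs (some c)
    else if some c = q then pvGoA (c :: acc) cs none
    else if c = '#' ∧ q = none then PySem.Chars.rstrip acc.reverse
    else pvGoA (c :: acc) cs q

def strip_inline_comment_toml_py (text : String) : String :=
  String.mk (pvGoA [] text.toList none)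

-- ===== PORT B =====
-- B's while-loop over indices ported as recursion on the remaining suffix;
-- text.find(c, i+1) for the 1-char needle c is exactly List.findIdx? (· = c) on the
-- remaining characters (none = Python's -1); 'return text' = acc.reverse ++ rest.
def pvGoB (acc rest : List Char) : List Char :=
  match rest with
  | [] => acc.reverse
  | c :: cs =>
    if c = '"' ∨ c = '\'' then
      match cs.findIdx? (· = c) with
      | none => acc.reverse ++ (c :: cs)
      | some j => pvGoB ((cs.take (j + 1)).reverse ++ c :: acc) (cs.drop (j + 1))
    else if c = '#' then PySem.Chars.rstrip acc.reverse
    else pvGoB (c :: acc) cs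
termination_by rest.length
decreasing_by
  · simp only [List.length_drop, List.length_cons]; omega
  · simp

def strip_inline_comment_toml_py_alt (text : String) : String :=
  String.mk (pvGoB [] text.toList)

-- ===== PRECONDITION & SPEC =====
def Spec_strip_inline_comment_toml_py (text : String) (out : String) : Prop := out = strip_inline_comment_toml_py_alt text
instance (text : String) (out : String) : Decidable (Spec_strip_inline_comment_toml_py text out) := by unfold Spec_strip_inline_comment_toml_py; infer_instance

-- ===== CLAIM (what is proved, stated in full; the proofs are below) =====
def Claim_equal_strip_inline_comment_toml_py : Prop := ∀ (text : String), Dom_strip_inline_comment_toml_py text → Spec_strip_inline_comment_toml_py text (strip_inline_comment_toml_py text)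

-- ===== LEMMAS AND PROOFS =====

-- A in quote state 'some q' consumes characters up to and including the next q
-- (or the whole rest if q never reappears): exactly B's jump.
theorem pvGoA_quote (cs : List Char) : ∀ (acc : List Char) (q : Char),
    pvGoA acc cs (some q) =
      match cs.findIdx? (· = q) with
      | none => acc.reverse ++ cs
      | some j => pvGoA ((cs.take (j + 1)).reverse ++ acc) (cs.drop (j + 1)) none := by
  induction cs with
  | nil => intro acc q; simp [pvGoA]
  | cons d ds ih =>
    intro acc q
    by_cases hd : d = q
    · subst hd
      simp [pvGoA, List.findIdx?_cons]
    · have : (decide (d = q)) = false := by simp [hd]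
      simp only [pvGoA, List.findIdx?_cons, this, Bool.false_eq_true, if_false]
      rw [if_neg (by simp), if_neg (by simp [hd]), if_neg (by simp), ih]
      cases h : ds.findIdx? (· = q) with
      | none => simp
      | some j => simp [List.take_succ_cons, List.drop_succ_cons]

theorem pvGoB_eq_pvGoA : ∀ (n : Nat) (rest : List Char), rest.length ≤ n →
    ∀ (acc : List Char), pvGoB acc rest = pvGoA acc rest none := by
  intro n
  induction n with
  | zero =>
    intro rest h acc
    have : rest = [] := List.eq_nil_of_length_eq_zero (Nat.le_zero.mp h)
    subst this; simp [pvGoB, pvGoA]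
  | succ n ih =>
    intro rest h acc
    cases rest with
    | nil => simp [pvGoB, pvGoA]
    | cons c cs =>
      by_cases hq : c = '\"' ∨ c = '\''
      · rw [pvGoB, pvGoA, if_pos hq, if_pos (by exact ⟨hq, rfl⟩), pvGoA_quote]
        cases hf : cs.findIdx? (· = c) with
        | none => simp
        | some j =>
          simp only
          exact ih _ (by
            have := List.length_drop (l := cs) (i := j + 1)
            simp only [List.length_cons] at h
            omega) _
      · have hB : pvGoB acc (c :: cs) =
            if c = '#' then PySem.Chars.rstrip acc.reverse else pvGoB (c :: acc) cs := by
          rw [pvGoB, if_neg hq]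
        have hA : pvGoA acc (c :: cs) none =
            if c = '#' then PySem.Chars.rstrip acc.reverse else pvGoA (c :: acc) cs none := by
          rw [pvGoA, if_neg (by simp [hq]), if_neg (by simp)]
          by_cases hh : c = '#'
          · rw [if_pos hh, if_pos ⟨hh, rfl⟩]
          · rw [if_neg hh, if_neg (by simp [hh])]
        rw [hB, hA]
        by_cases hh : c = '#'
        · rw [if_pos hh, if_pos hh]
        · rw [if_neg hh, if_neg hh]
          exact ih _ (by simp only [List.length_cons] at h; omega) _

-- ===== VERDICT (by name: the statement is the Claim_ definition above) =====
theorem strip_inline_comment_toml_py_spec : Claim_equal_strip_inline_comment_toml_py := by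
  intro text _
  unfold Spec_strip_inline_comment_toml_py strip_inline_comment_toml_py strip_inline_comment_toml_py_alt
  rw [pvGoB_eq_pvGoA text.toList.length _ le_rfl]
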